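-- pv_equiv track=rewrite | github.com/joaopauloag/paa | kmoedas.py | kMoedas
-- ===== SOURCE A (Python) =====
-- def kMoedas(moedas, v, k):
--
-- 	n = len(moedas)
-- 	r = [0] * (k+1)
--
-- 	for i in range(1, k+1):
-- 		maximo = 0
-- 		for j in range(n):
-- 			if r[i-1] + moedas[j] <= v and moedas[j] > maximo:
-- 				maximo = moedas[j]
-- 		r[i] = r[i-1] + maximo
--
-- 	return r[i] == v
-- ===== SOURCE B (Python) =====
-- def kMoedas(moedas, v, k):
--     # Sort the positive coins once (descending); a pointer only ever advances,
--     # and we stop as soon as no coin fits (the greedy sum can no longer change).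
--     coins = sorted((c for c in moedas if c > 0), reverse=True)
--     s = 0
--     p = 0
--     for _ in range(k):
--         while p < len(coins) and coins[p] > v - s:
--             p += 1
--         if p == len(coins):
--             break
--         s += coins[p]
--     return s == v
-- ===== Notes on version B (the rewrite author's own statement) =====
-- stated objective: faster
-- what changed: Instead of rescanning all coins on each of the k greedy steps, B sorts the positive coins descending once and advances a monotone pointer to the largest coin that still fits, breaking out as soon as no coin fits (after which A's sum can never change).
import Mathlib
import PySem

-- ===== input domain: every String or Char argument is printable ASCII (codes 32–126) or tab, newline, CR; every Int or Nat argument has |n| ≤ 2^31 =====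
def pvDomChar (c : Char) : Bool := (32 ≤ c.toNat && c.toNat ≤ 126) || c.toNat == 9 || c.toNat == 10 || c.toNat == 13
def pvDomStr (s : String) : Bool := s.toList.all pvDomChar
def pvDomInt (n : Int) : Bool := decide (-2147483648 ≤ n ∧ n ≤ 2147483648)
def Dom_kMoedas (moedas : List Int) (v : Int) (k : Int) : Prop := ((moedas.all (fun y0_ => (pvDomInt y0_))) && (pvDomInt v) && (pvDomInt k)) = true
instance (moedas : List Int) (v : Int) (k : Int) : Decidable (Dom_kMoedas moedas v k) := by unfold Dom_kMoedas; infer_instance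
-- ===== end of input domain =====

-- B sorts the positive coins once (descending) and advances a monotone pointer instead of
-- rescanning all coins on every one of the k greedy steps; it stops early once no coin fits.

-- ===== PORT A =====
-- A's inner 'for j in range(n)' loop (prev = r[i-1])
def innerA (moedas : List Int) (v prev : Int) : Int :=
  (PySem.List.pyRange 0 (PySem.List.len moedas) 1).foldl
    (fun maximo j =>
      if prev + PySem.List.pyGetD moedas j 0 ≤ v ∧ PySem.List.pyGetD moedas j 0 > maximo
      then PySem.List.pyGetD moedas j 0 else maximo) 0

-- A's outer loop body (state: the Python list r, kept as an Array, and the loop variable i).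
-- The indices i-1 and i Python uses here are always in range 0..k, so getD/setIfInBounds
-- read and write exactly the cells r[i-1] and r[i] (and i-1 ≥ 0, so .toNat is exact).
def bodyA (moedas : List Int) (v : Int) (st : Array Int × Int) (i : Int) : Array Int × Int :=
  let r := st.1
  let maximo := innerA moedas v (r.getD (i-1).toNat 0)
  (r.setIfInBounds i.toNat (r.getD (i-1).toNat 0 + maximo), i)

def kMoedas (moedas : List Int) (v : Int) (k : Int) : Bool :=
  let st := (PySem.List.pyRange 1 (k+1) 1).foldl (bodyA moedas v) (Array.replicate (k+1).toNat 0, 0)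
  decide (st.1.getD st.2.toNat 0 = v)

-- ===== PORT B =====
-- the inner 'while p < len(coins) and coins[p] > v - s: p += 1' of Source B
def advanceB (coins : List Int) (t : Int) (p : Nat) : Nat :=
  if h : p < coins.length then
    if t < coins[p] then advanceB coins t (p+1) else p
  else p
termination_by coins.length - p

-- the 'for _ in range(k)' loop of Source B (state: pointer p, running sum s)
def goB (coins : List Int) (v : Int) : Nat → Nat → Int → Int
  | 0, _, s => s
  | fuel+1, p, s =>
    let p' := advanceB coins (v - s) p
    if h : p' < coins.length then goB coins v fuel p' (s + coins[p'])
    else s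

def kMoedas_alt (moedas : List Int) (v : Int) (k : Int) : Bool :=
  decide (goB (PySem.List.sorted (moedas.filter (fun c => decide (0 < c))) (fun c => c) true)
            v k.toNat 0 0 = v)

-- ===== PRECONDITION & SPEC =====
-- A's loop variable i is unbound when the loop body never runs: for k ≤ 0 Python raises
-- UnboundLocalError at 'r[i]'.  Pre_ excludes exactly those inputs.
def Pre_kMoedas (moedas : List Int) (v : Int) (k : Int) : Prop := 1 ≤ k
instance (moedas : List Int) (v : Int) (k : Int) : Decidable (Pre_kMoedas moedas v k) := by unfold Pre_kMoedas; infer_instance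

def pvWitness_kMoedas : List Int × Int × Int := ([1, 2, 5], 11, 3)

def Spec_kMoedas (moedas : List Int) (v : Int) (k : Int) (out : Bool) : Prop := out = kMoedas_alt moedas v k
instance (moedas : List Int) (v : Int) (k : Int) (out : Bool) : Decidable (Spec_kMoedas moedas v k out) := by unfold Spec_kMoedas; infer_instance

-- ===== CLAIM (what is proved, stated in full; the proofs are below) =====
def Claim_equal_kMoedas : Prop := ∀ (moedas : List Int) (v : Int) (k : Int), Dom_kMoedas moedas v k → Pre_kMoedas moedas v k → Spec_kMoedas moedas v k (kMoedas moedas v k)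

-- ===== LEMMAS AND PROOFS =====

-- A's inner loop as a plain fold over the coin list (s = the previous partial sum)
def mxA (moedas : List Int) (v s : Int) : Int :=
  moedas.foldl (fun m c => if s + c ≤ v ∧ c > m then c else m) 0

-- one greedy step of A: add the best fitting coin (0 if none fits)
def stepA (moedas : List Int) (v : Int) (s : Int) : Int := s + mxA moedas v s

-- x is the maximum of 0 and the coins ≤ t
def IsMx (moedas : List Int) (t x : Int) : Prop :=
  0 ≤ x ∧ (∀ c ∈ moedas, c ≤ t → c ≤ x) ∧ (x = 0 ∨ (x ∈ moedas ∧ x ≤ t))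

theorem mxA_aux (v s : Int) : ∀ (L : List Int) (m : Int), 0 ≤ m →
    0 ≤ L.foldl (fun m c => if s + c ≤ v ∧ c > m then c else m) m ∧
    m ≤ L.foldl (fun m c => if s + c ≤ v ∧ c > m then c else m) m ∧
    (∀ c ∈ L, c ≤ v - s → c ≤ L.foldl (fun m c => if s + c ≤ v ∧ c > m then c else m) m) ∧
    (L.foldl (fun m c => if s + c ≤ v ∧ c > m then c else m) m = m ∨
      (L.foldl (fun m c => if s + c ≤ v ∧ c > m then c else m) m ∈ L ∧
       L.foldl (fun m c => if s + c ≤ v ∧ c > m then c else m) m ≤ v - s))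
  | [], m, hm => by simp [hm]
  | c :: L, m, hm => by
    simp only [List.foldl_cons]
    by_cases hc : s + c ≤ v ∧ c > m
    · have ih := mxA_aux v s L c (by omega)
      rw [if_pos hc] at *
      refine ⟨ih.1, by omega, ?_, ?_⟩
      · intro d hd hdt
        rcases List.mem_cons.mp hd with h | h
        · subst h; exact ih.2.1
        · exact ih.2.2.1 d h hdt
      · rcases ih.2.2.2 with h | h
        · exact Or.inr ⟨by simp [h], by rw [h]; omega⟩
        · exact Or.inr ⟨List.mem_cons_of_mem _ h.1, h.2⟩
    · have ih := mxA_aux v s L m hm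
      rw [if_neg hc] at *
      refine ⟨ih.1, ih.2.1, ?_, ?_⟩
      · intro d hd hdt
        rcases List.mem_cons.mp hd with h | h
        · subst h
          by_cases hdm : d > m
          · exact absurd ⟨by omega, hdm⟩ hc
          · omega
        · exact ih.2.2.1 d h hdt
      · rcases ih.2.2.2 with h | h
        · exact Or.inl h
        · exact Or.inr ⟨List.mem_cons_of_mem _ h.1, h.2⟩

theorem mxA_isMx (moedas : List Int) (v s : Int) : IsMx moedas (v - s) (mxA moedas v s) := by
  have h := mxA_aux v s moedas 0 le_rfl
  exact ⟨h.1, h.2.2.1, h.2.2.2.imp id id⟩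

theorem IsMx_unique {moedas : List Int} {t x y : Int} (hx : IsMx moedas t x) (hy : IsMx moedas t y) : x = y := by
  obtain ⟨hx0, hxb, hxm⟩ := hx
  obtain ⟨hy0, hyb, hym⟩ := hy
  have h1 : x ≤ y := by
    rcases hxm with h | h
    · omega
    · exact hyb x h.1 h.2
  have h2 : y ≤ x := by
    rcases hym with h | h
    · omega
    · exact hxb y h.1 h.2
  omega

theorem adv_le (coins : List Int) (t : Int) (p : Nat) (hp : p ≤ coins.length) :
    advanceB coins t p ≤ coins.length := by
  fun_induction advanceB <;> omega

theorem adv_skip (coins : List Int) (t : Int) (p : Nat) :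
    ∀ j (hj : j < coins.length), p ≤ j → j < advanceB coins t p → t < coins[j] := by
  fun_induction advanceB with
  | case1 p h hc ih =>
    intro j hj hpj hlt
    rcases Nat.eq_or_lt_of_le hpj with rfl | h'
    · exact hc
    · exact ih j hj h' hlt
  | case2 p h hc => intro j hj hpj hlt; omega
  | case3 p h => intro j hj hpj hlt; omega

theorem adv_stop (coins : List Int) (t : Int) (p : Nat)
    (h : advanceB coins t p < coins.length) : coins[advanceB coins t p] ≤ t := by
  fun_induction advanceB with
  | case1 p hp hc ih => exact ih h
  | case2 p hp hc => omega
  | case3 p hp => omega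

theorem goB_eq (moedas coins : List Int) (v : Int)
    (hmem : ∀ c, c ∈ coins ↔ c ∈ moedas ∧ 0 < c)
    (hsort : coins.Pairwise (fun a b => b ≤ a)) :
    ∀ (fuel p : Nat) (s : Int), p ≤ coins.length →
      (∀ j (hj : j < coins.length), j < p → v - s < coins[j]) →
      goB coins v fuel p s = (stepA moedas v)^[fuel] s := by
  intro fuel
  induction fuel with
  | zero => intro p s _ _; rfl
  | succ fuel ih =>
    intro p s hp hInv
    rw [goB]
    have hple : advanceB coins (v - s) p ≤ coins.length := adv_le coins (v - s) p hp
    have hInv' : ∀ j (hj : j < coins.length), j < advanceB coins (v - s) p → v - s < coins[j] := by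
      intro j hj hlt
      by_cases hjp : j < p
      · exact hInv j hj hjp
      · exact adv_skip coins (v - s) p j hj (by omega) hlt
    by_cases h : advanceB coins (v - s) p < coins.length
    · rw [dif_pos h]
      set p' := advanceB coins (v - s) p with hp'
      have hcp : coins[p'] ∈ coins := List.getElem_mem h
      have hcpos : 0 < coins[p'] := ((hmem _).mp hcp).2
      have hfit : coins[p'] ≤ v - s := adv_stop coins (v - s) p h
      have hmx : mxA moedas v s = coins[p'] := by
        refine IsMx_unique (mxA_isMx moedas v s) ⟨by omega, ?_, Or.inr ⟨((hmem _).mp hcp).1, hfit⟩⟩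
        intro c hc hct
        by_cases hc0 : 0 < c
        · obtain ⟨j, hj, rfl⟩ := List.mem_iff_getElem.mp ((hmem c).mpr ⟨hc, hc0⟩)
          by_cases hjp : j < p'
          · exact absurd hct (by have := hInv' j hj hjp; omega)
          · rcases Nat.eq_or_lt_of_le (Nat.le_of_not_lt hjp) with h' | h'
            · simp [h']
            · exact List.pairwise_iff_getElem.mp hsort p' j h hj h'
        · omega
      rw [ih p' (s + coins[p']) hple ?_]
      · have : stepA moedas v s = s + coins[p'] := by rw [stepA, hmx]
        rw [← this, ← Function.iterate_succ_apply]
      · intro j hj hlt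
        have := hInv' j hj hlt
        omega
    · rw [dif_neg h]
      have hmx : mxA moedas v s = 0 := by
        refine IsMx_unique (mxA_isMx moedas v s) ⟨le_rfl, ?_, Or.inl rfl⟩
        intro c hc hct
        by_cases hc0 : 0 < c
        · obtain ⟨j, hj, rfl⟩ := List.mem_iff_getElem.mp ((hmem c).mpr ⟨hc, hc0⟩)
          exact absurd hct (by have := hInv' j hj (by omega); omega)
        · omega
      have hfix : stepA moedas v s = s := by rw [stepA, hmx]; ring
      rw [Function.iterate_fixed hfix]

theorem alt_eq (moedas : List Int) (v k : Int) :
    kMoedas_alt moedas v k = decide ((stepA moedas v)^[k.toNat] 0 = v) := by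
  rw [kMoedas_alt]
  have hmem : ∀ c, c ∈ PySem.List.sorted (moedas.filter (fun c => decide (0 < c))) (fun c => c) true
      ↔ c ∈ moedas ∧ 0 < c := by
    intro c
    rw [PySem.List.mem_sorted, List.mem_filter]
    simp
  rw [goB_eq moedas _ v hmem (PySem.List.sorted_pairwise_rev _ _) k.toNat 0 0
      (Nat.zero_le _) (fun j hj h => by omega)]

theorem innerA_eq (moedas : List Int) (v prev : Int) : innerA moedas v prev = mxA moedas v prev := by
  rw [innerA, PySem.List.foldl_pyRange_pyGetD moedas 0 (fun m c => if prev + c ≤ v ∧ c > m then c else m) 0 (by norm_num)]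
  rfl

theorem arr_getD (a : Array Int) (i : Nat) (d : Int) : a.getD i d = a.toList.getD i d := by
  rcases a with ⟨L⟩
  simp [Array.getD, List.getD]
  split
  · rename_i h
    simp [List.getElem?_eq_getElem h]
  · rename_i h
    simp [List.getElem?_eq_none (by omega : L.length ≤ i)]

theorem arr_set (L : List Int) (i : Nat) (v : Int) :
    L.toArray.setIfInBounds i v = (L.set i v).toArray := by
  rw [← Array.toList_inj]
  simp

-- the list r after A has run iterations 1..m (positions > m still hold their initial 0)
def Rl (moedas : List Int) (v : Int) (N m : Nat) : List Int :=
  (List.range N).map (fun j => if j ≤ m then (stepA moedas v)^[j] 0 else 0)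

theorem Rl_set (moedas : List Int) (v : Int) (N m : Nat) (hm : m + 1 < N) :
    (Rl moedas v N m).set (m+1) ((stepA moedas v)^[m] 0 + mxA moedas v ((stepA moedas v)^[m] 0))
      = Rl moedas v N (m+1) := by
  have hv : (stepA moedas v)^[m] 0 + mxA moedas v ((stepA moedas v)^[m] 0) = (stepA moedas v)^[m+1] 0 := by
    rw [Function.iterate_succ_apply']; rfl
  rw [hv]
  apply List.ext_getElem
  · simp [Rl]
  · intro i h1 h2
    simp only [Rl, List.getElem_set, List.getElem_map, List.getElem_range] at *
    split_ifs with hi h3 h4 <;> first | rfl | omega | (subst hi; rfl)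

theorem outerA (moedas : List Int) (v k : Int) (hk : 1 ≤ k) :
    ∀ m : Nat, (m : Int) ≤ k →
      (PySem.List.pyRange 1 ((m:Int)+1) 1).foldl (bodyA moedas v) (Array.replicate (k+1).toNat 0, 0)
        = ((Rl moedas v (k+1).toNat m).toArray, (m:Int)) := by
  intro m
  induction m with
  | zero =>
    intro _
    rw [show ((0:Nat):Int) + 1 = 1 by norm_num, PySem.List.pyRange_one_eq_nil le_rfl]
    simp only [List.foldl_nil, Rl, Prod.mk.injEq]
    constructor
    · rw [← List.toArray_replicate, ← Array.toList_inj]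
      simp only [List.toList_toArray]
      apply List.ext_getElem
      · simp
      · intro i h1 h2
        simp only [List.getElem_replicate, List.getElem_map, List.getElem_range]
        split_ifs with h
        · have : i = 0 := by omega
          subst this; rfl
        · rfl
    · simp
  | succ m ih =>
    intro hm
    have hm' : (m : Int) ≤ k := by push_cast at hm ⊢; omega
    have hsplit : PySem.List.pyRange 1 ((↑(m+1):Int)+1) 1
        = PySem.List.pyRange 1 ((m:Int)+1) 1 ++ [(m:Int)+1] := by
      have : ((↑(m+1):Int)+1) = ((m:Int)+1) + 1 := by push_cast; ring
      rw [this, PySem.List.pyRange_one_succ_right (by omega)]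
    rw [hsplit, List.foldl_append, ih hm', List.foldl_cons, List.foldl_nil]
    rw [bodyA]
    have h1 : ((m:Int) + 1) - 1 = (m:Int) := by ring
    have hNm : m < (k+1).toNat := by omega
    have hNm1 : m + 1 < (k+1).toNat := by omega
    have hget : (Rl moedas v (k+1).toNat m).toArray.getD ((m:Int)+1-1).toNat 0 = (stepA moedas v)^[m] 0 := by
      rw [arr_getD, List.toList_toArray, show (((m:Int)+1-1)).toNat = m by omega,
          Rl, PySem.List.getD_map_range _ _ _ _ hNm]
      simp
    rw [hget, innerA_eq]
    have hset : (Rl moedas v (k+1).toNat m).toArray.setIfInBounds ((m:Int)+1).toNat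
        ((stepA moedas v)^[m] 0 + mxA moedas v ((stepA moedas v)^[m] 0))
        = (Rl moedas v (k+1).toNat (m+1)).toArray := by
      rw [show (((m:Int)+1)).toNat = m + 1 by omega, arr_set, Rl_set moedas v _ m hNm1]
    rw [hset]
    simp

theorem kMoedas_eq (moedas : List Int) (v k : Int) (hk : 1 ≤ k) :
    kMoedas moedas v k = decide ((stepA moedas v)^[k.toNat] 0 = v) := by
  rw [kMoedas]
  have hkk : ((k.toNat : Nat) : Int) = k := Int.toNat_of_nonneg (by omega)
  have := outerA moedas v k hk k.toNat (by omega)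
  rw [hkk] at this
  rw [this]
  have hlt : k.toNat < (k+1).toNat := by omega
  rw [arr_getD, List.toList_toArray, Rl, PySem.List.getD_map_range _ _ _ _ hlt]
  simp

-- ===== VERDICT (by name: the statement is the Claim_ definition above) =====
theorem kMoedas_spec : Claim_equal_kMoedas := by
  intro moedas v k _ hPre
  unfold Spec_kMoedas
  rw [kMoedas_eq moedas v k hPre, alt_eq]
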